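-- pv_equiv track=rewrite | github.com/Pl4tt/Algorithms | python/dynamic_programming/abc_create_word.py | recursive_is_valid
-- ===== SOURCE A (Python) =====
-- def recursive_is_valid(s, t=None, memo=None):
--     if memo is None:
--         memo = {}
--     if t is None:
--         t = ""
--
--     if t in memo:
--         return memo[t]
--     if s == t:
--         return True
--     if len(t) > len(s):
--         return False
--
--     for i in range(len(t)+1):
--         new_t = t[:i+1] + "abc" + t[i+1:]
--
--         if recursive_is_valid(s, new_t, memo):
--             memo[t] = True
--             return True
--
--     memo[t] = False
--     return False
-- ===== SOURCE B (Python) =====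
-- def recursive_is_valid(s, t=None, memo=None):
--     if t is None:
--         t = ""
--     stack = []
--     for c in s:
--         stack.append(c)
--         if stack[-3:] == ['a', 'b', 'c']:
--             del stack[-3:]
--     return stack == list(t)
-- ===== Notes on version B (the rewrite author's own statement) =====
-- stated objective: faster
-- what changed: Replaces the memoized exponential search over all strings reachable from t by inserting 'abc' with a single linear stack scan of s that pops every completed 'abc', returning whether the fully reduced stack equals t.
-- outside the precondition, e.g. on recursive_is_valid('abcx', 'x', None): A returns False, B returns True; on recursive_is_valid('abc', None, {'': False}): A returns False, B returns True
import Mathlib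
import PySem

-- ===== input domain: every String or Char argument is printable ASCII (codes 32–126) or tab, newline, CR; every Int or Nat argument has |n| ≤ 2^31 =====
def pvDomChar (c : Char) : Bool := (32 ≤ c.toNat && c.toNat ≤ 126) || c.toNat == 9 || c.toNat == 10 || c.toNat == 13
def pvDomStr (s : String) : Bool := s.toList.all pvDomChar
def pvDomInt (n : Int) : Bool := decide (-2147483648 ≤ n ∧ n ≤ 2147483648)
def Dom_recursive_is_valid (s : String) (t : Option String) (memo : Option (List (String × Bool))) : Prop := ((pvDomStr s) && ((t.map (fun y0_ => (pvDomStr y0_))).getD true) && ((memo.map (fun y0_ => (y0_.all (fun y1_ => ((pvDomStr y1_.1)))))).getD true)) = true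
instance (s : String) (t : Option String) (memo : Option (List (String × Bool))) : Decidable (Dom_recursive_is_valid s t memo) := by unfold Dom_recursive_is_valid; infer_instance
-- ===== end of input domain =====

-- B replaces A's memoized exponential insertion search by a single O(n) stack
-- reduction of s (pop each completed "abc"), comparing the residue with t.
-- Equivalence is about the RETURN value only: Python A fills the caller's memo
-- dict in place, B does not touch it.
-- Both ports work on the strings' code-point lists (exact on the ASCII domain).

-- ===== PORT A =====
def pvAbc : List Char := ['a', 'b', 'c']

-- the loop body of A: for i in range(len(t)+1): new_t = t[:i+1]+"abc"+t[i+1:];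
-- i ≥ 0, so the clamping Python slices t[:i+1]/t[i+1:] are exactly take/drop.
-- The in-place mutated memo dict is threaded through the calls.
def pvGoLoop (next : List Char → PySem.Dict (List Char) Bool → Bool × PySem.Dict (List Char) Bool)
    (t : List Char) :
    List Nat → PySem.Dict (List Char) Bool → Bool × PySem.Dict (List Char) Bool
  | [], m => (false, m.insert t false)           -- memo[t] = False; return False
  | i :: is, m =>
      match next (t.take (i + 1) ++ pvAbc ++ t.drop (i + 1)) m with
      | (true, m') => (true, m'.insert t true)   -- memo[t] = True; return True
      | (false, m') => pvGoLoop next t is m'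

-- A's recursion grows t by 3 chars per level and stops once len(t) > len(s);
-- fuel len(s)+1 outlasts that bound (the fuel = 0 arm is never reached).
def pvGo (s : List Char) (fuel : Nat) (t : List Char) (memo : PySem.Dict (List Char) Bool) :
    Bool × PySem.Dict (List Char) Bool :=
  match memo.get? t with                         -- if t in memo: return memo[t]
  | some b => (b, memo)
  | none =>
    if s == t then (true, memo)                  -- if s == t: return True
    else if t.length > s.length then (false, memo)  -- if len(t) > len(s): return False
    else
      match fuel with
      | 0 => (false, memo)
      | fuel' + 1 => pvGoLoop (pvGo s fuel') t (List.range (t.length + 1)) memo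

def recursive_is_valid (s : String) (t : Option String) (memo : Option (List (String × Bool))) : Bool :=
  let memo0 : PySem.Dict (List Char) Bool :=
    PySem.Dict.ofList ((memo.getD []).map (fun p => (p.1.toList, p.2)))
  let t0 := (t.getD "").toList
  (pvGo s.toList (s.toList.length + 1) t0 memo0).1

-- ===== PORT B =====
-- the stack is kept top-first (head = Python's stack[-1]): append = cons,
-- stack[-3:] == ['a','b','c'] = (take 3 · = ['c','b','a']), del stack[-3:] = drop 3.
def pvStep (st : List Char) (c : Char) : List Char :=
  if (c :: st).take 3 = ['c', 'b', 'a'] then (c :: st).drop 3 else c :: st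

def recursive_is_valid_alt (s : String) (t : Option String) (memo : Option (List (String × Bool))) : Bool :=
  let stack := s.toList.foldl pvStep []
  stack.reverse == (t.getD "").toList            -- return stack == list(t)

-- ===== PRECONDITION & SPEC =====
-- every string A's search can visit starting from base is a supersequence of
-- base whose length grew by a multiple of 3, each third adding one 'a', 'b', 'c'
def pvReach (base k : List Char) : Prop :=
  base.Sublist k ∧ (k.length - base.length) % 3 = 0 ∧
  k.count 'a' = base.count 'a' + (k.length - base.length) / 3 ∧
  k.count 'b' = base.count 'b' + (k.length - base.length) / 3 ∧
  k.count 'c' = base.count 'c' + (k.length - base.length) / 3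

-- Pre_ excludes calls that seed A's internal accumulator parameters t/memo with
-- INTERFERING values (the natural public call passes neither): a non-empty t
-- that is a subsequence of s, or a memo key shaped like a state of the search
-- from t — there A's answer depends on its never-at-position-0 insertions and
-- on trusting seeded memo entries verbatim.  On every other seeding the two
-- programs provably agree (the search fails and the stack residue differs from t).
def Pre_recursive_is_valid (s : String) (t : Option String) (memo : Option (List (String × Bool))) : Prop :=
  ((t.getD "").toList = [] ∨ ¬ (t.getD "").toList.Sublist s.toList) ∧
  ∀ p ∈ (memo.getD [] : List (String × Bool)), ¬ pvReach (t.getD "").toList p.1.toList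
instance (s : String) (t : Option String) (memo : Option (List (String × Bool))) : Decidable (Pre_recursive_is_valid s t memo) := by unfold Pre_recursive_is_valid pvReach; infer_instance

def pvWitness_recursive_is_valid : String × Option String × (Option (List (String × Bool))) :=
  ("aabcbc", none, none)

def Spec_recursive_is_valid (s : String) (t : Option String) (memo : Option (List (String × Bool))) (out : Bool) : Prop := out = recursive_is_valid_alt s t memo
instance (s : String) (t : Option String) (memo : Option (List (String × Bool))) (out : Bool) : Decidable (Spec_recursive_is_valid s t memo out) := by unfold Spec_recursive_is_valid; infer_instance

-- ===== CLAIM (what is proved, stated in full; the proofs are below) =====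
def Claim_equal_recursive_is_valid : Prop := ∀ (s : String) (t : Option String) (memo : Option (List (String × Bool))), Dom_recursive_is_valid s t memo → Pre_recursive_is_valid s t memo → Spec_recursive_is_valid s t memo (recursive_is_valid s t memo)

-- ===== LEMMAS AND PROOFS =====

-- "S is derivable from t": t = S, or S is derivable from t with one "abc"
-- inserted at a position A's loop reaches (never position 0, except into t = []).
inductive PvDer (S : List Char) : List Char → Prop
  | refl : PvDer S S
  | step (u v : List Char) : (u ≠ [] ∨ v = []) → PvDer S (u ++ pvAbc ++ v) → PvDer S (u ++ v)

theorem pvDer_length {S t : List Char} (h : PvDer S t) : t.length ≤ S.length := by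
  induction h with
  | refl => exact le_refl _
  | step u v huv hder ih => simp [pvAbc] at ih ⊢; omega

theorem pvDer_sublist {S t : List Char} (h : PvDer S t) : t.Sublist S := by
  induction h with
  | refl => exact List.Sublist.refl _
  | step u v huv hder ih =>
    have h1 : (u ++ v).Sublist (u ++ pvAbc ++ v) := by
      rw [List.append_assoc]
      exact List.Sublist.append_left (List.sublist_append_right _ _) u
    exact h1.trans ih

def pvIns (t : List Char) (i : Nat) : List Char := t.take (i + 1) ++ pvAbc ++ t.drop (i + 1)

theorem pvIns_length {t : List Char} {i : Nat} (hi : i ≤ t.length) :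
    (pvIns t i).length = t.length + 3 := by
  simp [pvIns, pvAbc]; omega

theorem pvDer_of_ins {S t : List Char} {i : Nat} (h : PvDer S (pvIns t i)) : PvDer S t := by
  have hst := PvDer.step (S := S) (t.take (i + 1)) (t.drop (i + 1)) ?_ h
  · simpa using hst
  · rcases t with _ | ⟨a, t'⟩
    · right; simp
    · left; simp

theorem pvDer_unfold {S t : List Char} (hne : t ≠ S) (h : PvDer S t) :
    ∃ i ≤ t.length, PvDer S (pvIns t i) := by
  cases h with
  | refl => exact absurd rfl hne
  | step u v huv hder =>
    rcases u with _ | ⟨a, u'⟩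
    · have hv : v = [] := by rcases huv with h' | h' <;> simp_all
      subst hv
      exact ⟨0, by simp, by simpa [pvIns] using hder⟩
    · refine ⟨u'.length, by simp; omega, ?_⟩
      have h1 : ((a :: u') ++ v).take (u'.length + 1) = a :: u' := by
        rw [List.take_append_of_le_length (by simp)]
        simp
      have h2 : ((a :: u') ++ v).drop (u'.length + 1) = v := by
        rw [List.drop_append_of_le_length (by simp)]
        simp
      simpa [pvIns, h1, h2] using hder

theorem pvIns_count (t : List Char) (i : Nat) (x : Char) :
    (pvIns t i).count x = t.count x + pvAbc.count x := by
  unfold pvIns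
  rw [List.count_append, List.count_append]
  conv_rhs => rw [← List.take_append_drop (i + 1) t, List.count_append]
  omega

theorem pvSublist_ins (t : List Char) (i : Nat) : t.Sublist (pvIns t i) := by
  conv_lhs => rw [← List.take_append_drop (i + 1) t]
  unfold pvIns
  rw [List.append_assoc]
  exact List.Sublist.append_left (List.sublist_append_right _ _) _

theorem pvReach_refl (b : List Char) : pvReach b b := by
  refine ⟨List.Sublist.refl _, ?_, ?_, ?_, ?_⟩ <;> simp

theorem pvReach_ins {base t : List Char} {i : Nat} (h : pvReach base t) (hi : i ≤ t.length) :
    pvReach base (pvIns t i) := by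
  obtain ⟨hsub, hmod, ha, hb, hc⟩ := h
  have hlen := List.Sublist.length_le hsub
  refine ⟨List.Sublist.trans hsub (pvSublist_ins t i), ?_, ?_, ?_, ?_⟩
  · rw [pvIns_length hi]; omega
  · rw [pvIns_length hi, pvIns_count, show pvAbc.count 'a' = 1 from by decide]; omega
  · rw [pvIns_length hi, pvIns_count, show pvAbc.count 'b' = 1 from by decide]; omega
  · rw [pvIns_length hi, pvIns_count, show pvAbc.count 'c' = 1 from by decide]; omega

-- pushing 'a','b','c' in a row leaves the stack unchanged
theorem pvStep_abc (st : List Char) : pvAbc.foldl pvStep st = st := by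
  have h1 : pvStep st 'a' = 'a' :: st := by simp [pvStep]
  have h2 : pvStep ('a' :: st) 'b' = 'b' :: 'a' :: st := by simp [pvStep]
  have h3 : pvStep ('b' :: 'a' :: st) 'c' = st := by simp [pvStep]
  simp [pvAbc, List.foldl, h1, h2, h3]

theorem pvRed_insert (u v : List Char) (st : List Char) :
    (u ++ pvAbc ++ v).foldl pvStep st = (u ++ v).foldl pvStep st := by
  simp [List.foldl_append, pvStep_abc]

def pvRed (l : List Char) : List Char := l.foldl pvStep []

theorem pvDer_red {S t : List Char} (h : PvDer S t) : pvRed S = pvRed t := by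
  induction h with
  | refl => rfl
  | step u v huv hder ih => rw [ih]; exact pvRed_insert u v []

-- the stack's content is always a (reversed) sublist of what was fed in
theorem pvFoldl_sublist : ∀ (l st : List Char),
    (l.foldl pvStep st).reverse.Sublist (st.reverse ++ l) := by
  intro l
  induction l with
  | nil => intro st; simp
  | cons c l' ih =>
    intro st
    have h1 : (pvStep st c).reverse.Sublist (st.reverse ++ [c]) := by
      unfold pvStep
      split
      · have hd : (c :: st).drop 3 = st.drop 2 := rfl
        rw [hd]
        exact List.Sublist.trans ((List.drop_sublist 2 st).reverse)
          (List.sublist_append_left _ _)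
      · simp
    rw [List.foldl_cons]
    exact (ih (pvStep st c)).trans (by simpa using List.Sublist.append_right h1 l')

theorem pvRed_rev_sublist (l : List Char) : (pvRed l).reverse.Sublist l := by
  simpa using pvFoldl_sublist l []

-- if no "abc" occurs across acc.reverse ++ l, the fold just pushes everything
theorem pvFoldl_no_abc : ∀ (l acc : List Char),
    (¬ ∃ u v, acc.reverse ++ l = u ++ pvAbc ++ v) → l.foldl pvStep acc = l.reverse ++ acc := by
  intro l
  induction l with
  | nil => intro acc _; simp
  | cons c l' ih =>
    intro acc hno
    have hstep : pvStep acc c = c :: acc := by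
      by_cases h : (c :: acc).take 3 = ['c', 'b', 'a']
      · exfalso
        rcases acc with _ | ⟨x, acc1⟩
        · simp at h
        · rcases acc1 with _ | ⟨y, acc2⟩
          · simp at h
          · simp at h
            obtain ⟨hc, hx, hy⟩ := h
            subst hc; subst hx; subst hy
            exact hno ⟨acc2.reverse, l', by simp [pvAbc]⟩
      · simp only [pvStep]; rw [if_neg h]
    rw [List.foldl_cons, hstep,
      ih (c :: acc) (by rintro ⟨u, v, huv⟩; exact hno ⟨u, v, by simpa using huv⟩)]
    simp

theorem pvExists_abc {S : List Char} (h : pvRed S = []) (hne : S ≠ []) :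
    ∃ u v, S = u ++ pvAbc ++ v := by
  by_contra hno
  have hfold := pvFoldl_no_abc S [] (by simpa using hno)
  rw [pvRed, hfold] at h
  simp at h
  exact hne h

theorem pvDer_snoc {t u v : List Char} (hc : u ≠ [] ∨ v = []) (h : PvDer (u ++ v) t) :
    PvDer (u ++ pvAbc ++ v) t := by
  induction h with
  | refl => exact PvDer.step u v hc PvDer.refl
  | step p q hpq hder ih => exact PvDer.step p q hpq ih

theorem pvRed_der : ∀ (n : Nat) (S : List Char), S.length ≤ n → pvRed S = [] → PvDer S [] := by
  intro n
  induction n with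
  | zero =>
    intro S hlen _
    have hS : S = [] := by
      cases S with
      | nil => rfl
      | cons a l => simp at hlen
    subst hS; exact PvDer.refl
  | succ n ih =>
    intro S hlen hred
    by_cases hS : S = []
    · subst hS; exact PvDer.refl
    obtain ⟨u, v, huv⟩ := pvExists_abc hred hS
    by_cases hu : u = []
    · subst hu
      simp only [List.nil_append] at huv
      by_cases hv : v = []
      · subst hv
        simp only [List.append_nil] at huv
        subst huv
        exact PvDer.step [] [] (Or.inr rfl) (by simpa using PvDer.refl)
      · have hredv : pvRed v = [] := by
          have he := pvRed_insert [] v []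
          simp only [List.nil_append] at he
          rw [pvRed, huv] at hred
          rw [pvRed, ← he]
          exact hred
        obtain ⟨p, q, hpq⟩ := pvExists_abc hredv hv
        have hlen' : (pvAbc ++ (p ++ q)).length ≤ n := by
          rw [huv, hpq] at hlen; simp [pvAbc] at hlen ⊢; omega
        have hred' : pvRed (pvAbc ++ (p ++ q)) = [] := by
          have e1 := pvRed_insert [] (p ++ q) []
          simp only [List.nil_append] at e1
          have e2 := pvRed_insert p q []
          rw [pvRed, e1, ← e2, ← hpq]
          exact hredv
        have hd := ih _ hlen' hred'
        have hsnoc := pvDer_snoc (t := ([] : List Char)) (u := pvAbc ++ p) (v := q)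
          (Or.inl (by simp [pvAbc])) (by simpa using hd)
        rw [huv, hpq]
        simpa using hsnoc
    · have hredv : pvRed (u ++ v) = [] := by
        have he := pvRed_insert u v []
        rw [pvRed, huv, he] at hred
        exact hred
      have hlen' : (u ++ v).length ≤ n := by
        rw [huv] at hlen; simp [pvAbc] at hlen ⊢; omega
      have hd := ih _ hlen' hredv
      rw [huv]
      exact pvDer_snoc (Or.inl hu) hd

-- memo entries at keys the search can visit are correct; other keys are never read
def pvInv (base S : List Char) (m : PySem.Dict (List Char) Bool) : Prop :=
  ∀ k b, m.get? k = some b → pvReach base k → (b = true ↔ PvDer S k)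

theorem pvInv_insert {base S k : List Char} {b : Bool} {m : PySem.Dict (List Char) Bool}
    (hm : pvInv base S m) (hk : b = true ↔ PvDer S k) : pvInv base S (m.insert k b) := by
  intro k' b' hget _hr
  by_cases hkk : k' = k
  · subst hkk
    rw [PySem.Dict.get?_insert_self] at hget
    cases hget; exact hk
  · rw [PySem.Dict.get?_insert_of_ne _ _ hkk] at hget
    exact hm k' b' hget _hr

theorem pvGoLoop_correct (s base : List Char) (fuel' : Nat) (t : List Char)
    (hbase : pvReach base t)
    (hb : s.length < t.length + 3 * (fuel' + 1))
    (hrec : ∀ t' m, pvReach base t' → s.length < t'.length + 3 * fuel' → pvInv base s m →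
      pvInv base s (pvGo s fuel' t' m).2 ∧ ((pvGo s fuel' t' m).1 = true ↔ PvDer s t')) :
    ∀ (is : List Nat) (m : PySem.Dict (List Char) Bool), pvInv base s m →
      (∀ i ∈ is, i ≤ t.length) →
      ((¬ ∃ i ∈ is, PvDer s (pvIns t i)) → ¬ PvDer s t) →
      pvInv base s (pvGoLoop (pvGo s fuel') t is m).2 ∧
        ((pvGoLoop (pvGo s fuel') t is m).1 = true ↔ ∃ i ∈ is, PvDer s (pvIns t i)) := by
  intro is
  induction is with
  | nil =>
    intro m hm _ hrest
    refine ⟨pvInv_insert hm ?_, by simp [pvGoLoop]⟩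
    simp only [Bool.false_eq_true, false_iff]
    exact hrest (by simp)
  | cons i is ih =>
    intro m hm hmem hrest
    have hib : i ≤ t.length := hmem i (by simp)
    obtain ⟨hinv', hiff⟩ := hrec (pvIns t i) m (pvReach_ins hbase hib)
      (by rw [pvIns_length hib]; omega) hm
    rcases hcall : pvGo s fuel' (pvIns t i) m with ⟨r, m'⟩
    rw [hcall] at hinv' hiff
    simp only at hinv' hiff
    have hunfold : pvGoLoop (pvGo s fuel') t (i :: is) m =
        match pvGo s fuel' (pvIns t i) m with
        | (true, m') => (true, m'.insert t true)
        | (false, m') => pvGoLoop (pvGo s fuel') t is m' := rfl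
    rw [hunfold, hcall]
    cases r with
    | true =>
      have hder : PvDer s (pvIns t i) := hiff.mp rfl
      refine ⟨pvInv_insert hinv' (by simp only [true_iff]; exact pvDer_of_ins hder), ?_⟩
      simp only [true_iff]
      exact ⟨i, by simp, hder⟩
    | false =>
      have hni : ¬ PvDer s (pvIns t i) := by
        intro hd
        have := hiff.mpr hd
        simp at this
      have hrest' : (¬ ∃ j ∈ is, PvDer s (pvIns t j)) → ¬ PvDer s t := by
        intro hno
        apply hrest
        rintro ⟨j, hj, hd⟩
        rcases List.mem_cons.mp hj with hji | hjtail
        · subst hji; exact hni hd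
        · exact hno ⟨j, hjtail, hd⟩
      obtain ⟨hinv'', hiff''⟩ := ih m' hinv' (fun j hj => hmem j (List.mem_cons_of_mem _ hj)) hrest'
      refine ⟨hinv'', ?_⟩
      rw [hiff'']
      constructor
      · rintro ⟨j, hj, hd⟩; exact ⟨j, List.mem_cons_of_mem _ hj, hd⟩
      · rintro ⟨j, hj, hd⟩
        rcases List.mem_cons.mp hj with hji | hjtail
        · subst hji; exact absurd hd hni
        · exact ⟨j, hjtail, hd⟩

theorem pvGo_correct : ∀ (fuel : Nat) (s base t : List Char) (m : PySem.Dict (List Char) Bool),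
    pvReach base t → s.length < t.length + 3 * fuel → pvInv base s m →
    pvInv base s (pvGo s fuel t m).2 ∧ ((pvGo s fuel t m).1 = true ↔ PvDer s t) := by
  intro fuel
  induction fuel with
  | zero =>
    intro s base t m hbase hb hm
    rw [pvGo]
    cases hget : m.get? t with
    | some b => exact ⟨hm, hm t b hget hbase⟩
    | none =>
      have hgt : t.length > s.length := by omega
      have hne : ¬ s == t := by
        simp only [beq_iff_eq]
        intro he; subst he; omega
      simp only [hne, Bool.false_eq_true, if_false, hgt, if_true]
      refine ⟨hm, ?_⟩
      simp only [Bool.false_eq_true, false_iff]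
      intro hd
      have := pvDer_length hd
      omega
  | succ fuel' ih =>
    intro s base t m hbase hb hm
    rw [pvGo]
    cases hget : m.get? t with
    | some b => exact ⟨hm, hm t b hget hbase⟩
    | none =>
      by_cases hst : s = t
      · subst hst
        simp only [BEq.rfl, if_true]
        exact ⟨hm, by simp [PvDer.refl]⟩
      · have hne : (s == t) = false := by simp [hst]
        rw [hne]
        simp only [Bool.false_eq_true, if_false]
        by_cases hgt : t.length > s.length
        · simp only [hgt, if_true]
          refine ⟨hm, ?_⟩
          simp only [Bool.false_eq_true, false_iff]
          intro hd
          have := pvDer_length hd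
          omega
        · simp only [hgt, if_false]
          have hloop := pvGoLoop_correct s base fuel' t hbase hb
            (fun t' m' hr' hb' hm' => ih s base t' m' hr' hb' hm')
            (List.range (t.length + 1)) m hm
            (fun i hi => by have := List.mem_range.mp hi; omega)
            ?_
          · obtain ⟨hinv, hiff⟩ := hloop
            refine ⟨hinv, ?_⟩
            rw [hiff]
            constructor
            · rintro ⟨i, _, hd⟩; exact pvDer_of_ins hd
            · intro hd
              obtain ⟨i, hi, hdi⟩ := pvDer_unfold (fun he => hst he.symm) hd
              exact ⟨i, List.mem_range.mpr (by omega), hdi⟩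
          · intro hno hd
            obtain ⟨i, hi, hdi⟩ := pvDer_unfold (fun he => hst he.symm) hd
            exact hno ⟨i, List.mem_range.mpr (by omega), hdi⟩

-- any key looked up in the converted memo came from the input association list
theorem pvUpdate_items_mem : ∀ (M : List (List Char × Bool)) (d : PySem.Dict (List Char) Bool)
    (p : List Char × Bool), p ∈ (d.update M).items → (∃ v, (p.1, v) ∈ M) ∨ p ∈ d.items := by
  intro M
  induction M with
  | nil => intro d p h; right; exact h
  | cons q M' ih =>
    intro d p h
    have hstep : d.update (q :: M') = (d.insert q.1 q.2).update M' := rfl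
    rw [hstep] at h
    rcases ih (d.insert q.1 q.2) p h with ⟨v, hv⟩ | hd
    · exact Or.inl ⟨v, List.mem_cons_of_mem _ hv⟩
    · rcases (PySem.Dict.mem_items_insert d q.1 q.2 p).mp hd with he | ⟨hmem, _⟩
      · refine Or.inl ⟨q.2, ?_⟩
        rw [he]
        exact List.mem_cons_self ..
      · exact Or.inr hmem

theorem pvOfList_get?_mem {M : List (List Char × Bool)} {k : List Char} {b : Bool}
    (h : (PySem.Dict.ofList M).get? k = some b) : ∃ v, (k, v) ∈ M := by
  have hit := PySem.Dict.mem_items_of_get?_eq_some _ h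
  rcases pvUpdate_items_mem M PySem.Dict.empty (k, b) hit with hv | hemp
  · exact hv
  · simp [PySem.Dict.empty] at hemp

theorem pvDer_nil_iff (S : List Char) : PvDer S [] ↔ pvRed S = [] := by
  constructor
  · intro h
    have := pvDer_red h
    simpa [pvRed] using this
  · intro h
    exact pvRed_der S.length S le_rfl h

-- ===== VERDICT (by name: the statement is the Claim_ definition above) =====
theorem recursive_is_valid_spec : Claim_equal_recursive_is_valid := by
  unfold Claim_equal_recursive_is_valid
  intro s t memo _ hpre
  obtain ⟨hpre1, hpre2⟩ := hpre
  unfold Spec_recursive_is_valid recursive_is_valid recursive_is_valid_alt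
  simp only
  have hinv : pvInv (t.getD "").toList s.toList
      (PySem.Dict.ofList ((memo.getD []).map (fun p => (p.1.toList, p.2)))) := by
    intro k b hget hr
    exfalso
    obtain ⟨v, hkv⟩ := pvOfList_get?_mem hget
    obtain ⟨p, hp, hpe⟩ := List.mem_map.mp hkv
    have hk : p.1.toList = k := congrArg Prod.fst hpe
    exact hpre2 p hp (hk ▸ hr)
  have hmain := pvGo_correct (s.toList.length + 1) s.toList (t.getD "").toList
    (t.getD "").toList _ (pvReach_refl _) (by omega) hinv
  rcases hpre1 with hnil | hnsub
  · rw [hnil] at hmain ⊢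
    rw [Bool.eq_iff_iff, hmain.2, pvDer_nil_iff]
    simp [pvRed]
  · have hA : (pvGo s.toList (s.toList.length + 1) (t.getD "").toList
        (PySem.Dict.ofList ((memo.getD []).map (fun p => (p.1.toList, p.2))))).1 = false := by
      rw [Bool.eq_false_iff, Ne, hmain.2]
      exact fun hd => hnsub (pvDer_sublist hd)
    have hB : ((s.toList.foldl pvStep []).reverse == (t.getD "").toList) = false := by
      rw [beq_eq_false_iff_ne]
      intro he
      exact hnsub (he ▸ pvRed_rev_sublist s.toList)
    rw [hA, hB]
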